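-- pv_equiv track=rewrite | github.com/GonSo37/python-exercises | flip_the_coin.py | count11
-- ===== SOURCE A (Python) =====
-- def count11(seq):
--     countOf11 = 0
--     i = 0
--     while i < len(seq) - 1:
--         if seq[i] == 1 and seq[i + 1] == 1:
--             countOf11 += 1
--             i += 1
--         else:
--             i += 1
--     return countOf11
-- ===== SOURCE B (Python) =====
-- from itertools import groupby
--
--
-- def count11(seq):
--     # Counts adjacent 1,1 pairs via maximal runs of equal elements:
--     # a run of k ones contains exactly k-1 overlapping 11 pairs.
--     total = 0
--     for key, grp in groupby(seq):
--         n = len(list(grp))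
--         if key == 1:
--             total += n - 1
--     return total
-- ===== Notes on version B (the rewrite author's own statement) =====
-- stated objective: alternative
-- what changed: Replaces the index-based while loop over positions with an itertools.groupby run-length pass that adds (runlength - 1) for each maximal run of ones.
import Mathlib
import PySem

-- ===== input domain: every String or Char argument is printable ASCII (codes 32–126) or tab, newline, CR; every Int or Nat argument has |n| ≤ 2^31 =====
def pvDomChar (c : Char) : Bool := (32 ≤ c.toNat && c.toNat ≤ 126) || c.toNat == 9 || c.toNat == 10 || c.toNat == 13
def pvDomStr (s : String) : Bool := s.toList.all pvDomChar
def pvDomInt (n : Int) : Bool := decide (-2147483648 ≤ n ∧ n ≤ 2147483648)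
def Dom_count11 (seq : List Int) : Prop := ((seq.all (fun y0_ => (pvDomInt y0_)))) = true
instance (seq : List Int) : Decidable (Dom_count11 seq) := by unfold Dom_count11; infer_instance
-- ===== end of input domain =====

-- B replaces A's index-based while loop with a run-length (groupby) pass adding (runlength-1) per run of ones; alternative decomposition, same cost.


-- ===== PORT A =====
-- while i < len(seq) - 1: … ; fuel = len(seq) bounds the iteration count (the loop runs at
-- most len-1 times), and seq[i] is always in range inside the loop, so pyGetD is exact here.
def count11Go (fuel : Nat) (seq : List Int) (i countOf11 : Int) : Int :=
  match fuel with
  | 0 => countOf11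
  | fuel + 1 =>
    if i < (seq.length : Int) - 1 then
      if PySem.List.pyGetD seq i 0 = 1 ∧ PySem.List.pyGetD seq (i + 1) 0 = 1 then
        count11Go fuel seq (i + 1) (countOf11 + 1)
      else
        count11Go fuel seq (i + 1) countOf11
    else countOf11

def count11 (seq : List Int) : Int := count11Go seq.length seq 0 0

-- ===== PORT B =====
-- the groupby step: length of the maximal leading run of `a` in the list, and the remainder
def takeRun (a : Int) : List Int → Nat × List Int
  | [] => (0, [])
  | b :: t => if b = a then ((takeRun a t).1 + 1, (takeRun a t).2) else (0, b :: t)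

-- one step per group; fuel = length of the list bounds the number of groups
def count11AltGo (fuel : Nat) (l : List Int) : Int :=
  match fuel, l with
  | _, [] => 0
  | 0, _ :: _ => 0
  | fuel + 1, a :: t =>
    (if a = 1 then ((takeRun a t).1 : Int) else 0) + count11AltGo fuel (takeRun a t).2

def count11_alt (seq : List Int) : Int := count11AltGo seq.length seq

-- ===== PRECONDITION & SPEC =====
def Spec_count11 (seq : List Int) (out : Int) : Prop := out = count11_alt seq
instance (seq : List Int) (out : Int) : Decidable (Spec_count11 seq out) := by unfold Spec_count11; infer_instance

-- ===== CLAIM (what is proved, stated in full; the proofs are below) =====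
def Claim_equal_count11 : Prop := ∀ (seq : List Int), Dom_count11 seq → Spec_count11 seq (count11 seq)

-- ===== LEMMAS AND PROOFS =====

/-- Reference count: number of adjacent (1,1) pairs. -/
def pairCount : List Int → Int
  | a :: b :: t => (if a = 1 ∧ b = 1 then 1 else 0) + pairCount (b :: t)
  | _ => 0

theorem pairCount_short (l : List Int) (h : l.length ≤ 1) : pairCount l = 0 := by
  match l, h with
  | [], _ => rfl
  | [_], _ => rfl

theorem takeRun_len_le (a : Int) (t : List Int) : (takeRun a t).2.length ≤ t.length := by
  induction t with
  | nil => simp [takeRun]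
  | cons b t ih =>
    simp only [takeRun]
    split
    · exact Nat.le_succ_of_le ih
    · simp

theorem count11Go_eq (fuel : Nat) (seq : List Int) (i c : Int) (hi : 0 ≤ i)
    (hf : (seq.length : Int) - 1 - i ≤ fuel) :
    count11Go fuel seq i c = c + pairCount (seq.drop i.toNat) := by
  induction fuel generalizing i c with
  | zero =>
    have h : ¬ i < (seq.length : Int) - 1 := by simpa using hf
    rw [count11Go, pairCount_short _ (by rw [List.length_drop]; omega)]
    ring
  | succ fuel ih =>
    by_cases h : i < (seq.length : Int) - 1
    · have h1 : i.toNat < seq.length := by omega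
      have h2 : i.toNat + 1 < seq.length := by omega
      have hd1 : seq.drop i.toNat = seq[i.toNat] :: seq.drop (i.toNat + 1) :=
        (List.getElem_cons_drop h1).symm
      have hd2 : seq.drop (i.toNat + 1) = seq[i.toNat + 1] :: seq.drop (i.toNat + 2) :=
        (List.getElem_cons_drop h2).symm
      have ht : (i + 1).toNat = i.toNat + 1 := by omega
      by_cases hc : PySem.List.pyGetD seq i 0 = 1 ∧ PySem.List.pyGetD seq (i + 1) 0 = 1
      · have e1 : seq[i.toNat] = 1 := by
          have := hc.1; rwa [PySem.List.pyGetD_eq_getElem seq 0 hi (by omega)] at this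
        have e2 : seq[i.toNat + 1] = 1 := by
          have := hc.2
          rw [PySem.List.pyGetD_eq_getElem seq 0 (by omega) (by omega)] at this
          simpa [ht] using this
        rw [count11Go, if_pos h, if_pos hc, ih (i + 1) (c + 1) (by omega) (by omega)]
        rw [ht, hd1, hd2, pairCount, e1, e2]
        simp; ring
      · rw [count11Go, if_pos h, if_neg hc, ih (i + 1) c (by omega) (by omega)]
        have hc' : ¬ (seq[i.toNat] = 1 ∧ seq[i.toNat + 1] = 1) := by
          intro ⟨e1, e2⟩
          apply hc
          constructor
          · rw [PySem.List.pyGetD_eq_getElem seq 0 hi (by omega)]; exact e1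
          · rw [PySem.List.pyGetD_eq_getElem seq 0 (by omega) (by omega)]
            simpa [ht] using e2
        rw [ht, hd1]
        conv_rhs => rw [hd2]
        rw [pairCount, if_neg hc', ← hd2]
        ring
    · rw [count11Go, if_neg h, pairCount_short _ (by rw [List.length_drop]; omega)]
      ring

theorem pairCount_cons (a : Int) (t : List Int) :
    pairCount (a :: t) =
      (if a = 1 then ((takeRun a t).1 : Int) else 0) + pairCount (takeRun a t).2 := by
  induction t with
  | nil => simp [takeRun, pairCount]
  | cons b t ih =>
    by_cases hb : b = a
    · subst hb
      rw [pairCount, ih]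
      simp only [takeRun]
      by_cases ha : b = 1
      · subst ha; simp; ring
      · simp [ha]
    · simp only [takeRun, if_neg hb]
      have : ¬ (a = 1 ∧ b = 1) := by
        rintro ⟨ha, hb1⟩; exact hb (hb1.trans ha.symm)
      rw [pairCount, if_neg this]
      split
      · simp
      · simp

theorem count11AltGo_eq (fuel : Nat) (l : List Int) (hf : l.length ≤ fuel) :
    count11AltGo fuel l = pairCount l := by
  induction fuel generalizing l with
  | zero =>
    match l, hf with
    | [], _ => rfl
  | succ fuel ih =>
    match l with
    | [] => rfl
    | a :: t =>
      rw [count11AltGo, pairCount_cons, ih _ (by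
        have := takeRun_len_le a t
        simp at hf; omega)]

-- ===== VERDICT (by name: the statement is the Claim_ definition above) =====
theorem count11_spec : Claim_equal_count11 := by
  intro seq _
  unfold Spec_count11 count11 count11_alt
  rw [count11Go_eq seq.length seq 0 0 le_rfl (by omega),
      count11AltGo_eq seq.length seq le_rfl]
  simp
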